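-- pv_equiv track=rewrite | github.com/Harshvishwa123/IQB-assignments | IQB_assignment_2.py | Finding_Nucleation_Sites
-- ===== SOURCE A (Python) =====
-- protein_sequence=(  "MNASSEGESFAGSVQIPGGTTVLVELTPDIHICGICKQQFNNLDAFVAHKQSGCQLTGTSAAAP"
--                     "STVQFVSEETVPATQTQTTTRTITSETQTITVSAPEFVFEHGYQTYLPTESNENQTATVISLPA"
--                     "KSRTKKPTTPPAQKRLNCCYPGCQFKTAYGMKDMERHLKIHTGDKPHKCEVCGKCFSRKDKLKT"
--                     "HMRCHTGVKPYKCKTCDYAAADSSSLNKHLRIHSDERPFKCQICPYASRNSSQLTVHLRSHTAS"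
--                     "ELDDDVPKANCLSTESTDTPKAPVITLPSEAREQMATLGERTFNCCYPGCHFKTVHGMKDLDRH"
--                     "LRIHTGDKPHKCEFCDKCFSRKDNLTMHMRCHTSVKPHKCHLCDYAAVDSSSLKKHLRIHSDER"
--                     "PYKCQLCPYASRNSSQLTVHLRSHTGDTPFQCWLCSAKFKISSDLKRHMIVHSGEKPFKCEFCD"
--                     "VRCTMKANLKSHIRIKHTFKCLHCAFQGRDRADLLEHSRLHQADHPEKCPECSYSCSSAAALRV"
--                     "HSRVHCKDRPFKCDFCSFDTKRPSSLAKHVDKVHRDEAKTENRAPLGKEGLREGSSQHVAKIVT"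
--                     "QRAFRCETCGASFVRDDSLRCHKKQHSDQSENKNSDLVTFPPESGASGQLSTLVSVGQLEAPLE"
--                     "PSQDL"   )
--
-- One_letterCODE_to_Three_letterCODE = {
--     'A': 'Ala', 'R': 'Arg', 'N': 'Asn', 'D': 'Asp',
--     'C': 'Cys', 'E': 'Glu', 'Q': 'Gln', 'G': 'Gly',
--     'H': 'His', 'I': 'Ile', 'L': 'Leu', 'K': 'Lys',
--     'M': 'Met', 'F': 'Phe', 'P': 'Pro', 'S': 'Ser',
--     'T': 'Thr', 'W': 'Trp', 'Y': 'Tyr', 'V': 'Val'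
-- }
--
-- alpha = {'Glu': 1.53, 'Ala': 1.45, 'Leu': 1.34, 'His': 1.24, 'Met': 1.20,
--          'Gln': 1.17, 'Trp': 1.14, 'Val': 1.14, 'Phe': 1.12, 'Lys': 1.07,
--          'Ile': 1.00, 'Asp': 0.98, 'Thr': 0.82, 'Ser': 0.79, 'Arg': 0.79,
--          'Cys': 0.77, 'Asn': 0.73, 'Tyr': 0.61, 'Pro': 0.59, 'Gly': 0.53 }
--
-- len_of_sequence=len(protein_sequence)
--
-- def Finding_Nucleation_Sites(window_size, Helix_or_BetaStrand, window_score):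
--     pointers = []
--     for current_index in range(len_of_sequence):
--         start_index = current_index
--         end_index = current_index + (window_size - 1)
--         window_sequence = protein_sequence[start_index:end_index + 1]
--         if len(window_sequence) != window_size:
--             break
--         counter = sum(1 for char in window_sequence if One_letterCODE_to_Three_letterCODE[char] in alpha if alpha[One_letterCODE_to_Three_letterCODE[char]] >= 1)
--         if counter >= window_score:
--             pointers.append([start_index, end_index])
--     # Return a list of pointers indicating the start and end indices of the identified nucleation sites.
--     return pointers
-- ===== SOURCE B (Python) =====
-- protein_sequence=(  "MNASSEGESFAGSVQIPGGTTVLVELTPDIHICGICKQQFNNLDAFVAHKQSGCQLTGTSAAAP"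
--                     "STVQFVSEETVPATQTQTTTRTITSETQTITVSAPEFVFEHGYQTYLPTESNENQTATVISLPA"
--                     "KSRTKKPTTPPAQKRLNCCYPGCQFKTAYGMKDMERHLKIHTGDKPHKCEVCGKCFSRKDKLKT"
--                     "HMRCHTGVKPYKCKTCDYAAADSSSLNKHLRIHSDERPFKCQICPYASRNSSQLTVHLRSHTAS"
--                     "ELDDDVPKANCLSTESTDTPKAPVITLPSEAREQMATLGERTFNCCYPGCHFKTVHGMKDLDRH"
--                     "LRIHTGDKPHKCEFCDKCFSRKDNLTMHMRCHTSVKPHKCHLCDYAAVDSSSLKKHLRIHSDER"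
--                     "PYKCQLCPYASRNSSQLTVHLRSHTGDTPFQCWLCSAKFKISSDLKRHMIVHSGEKPFKCEFCD"
--                     "VRCTMKANLKSHIRIKHTFKCLHCAFQGRDRADLLEHSRLHQADHPEKCPECSYSCSSAAALRV"
--                     "HSRVHCKDRPFKCDFCSFDTKRPSSLAKHVDKVHRDEAKTENRAPLGKEGLREGSSQHVAKIVT"
--                     "QRAFRCETCGASFVRDDSLRCHKKQHSDQSENKNSDLVTFPPESGASGQLSTLVSVGQLEAPLE"
--                     "PSQDL"   )
--
-- # residues whose alpha-helix propensity is >= 1 in the table (Glu .. Ile)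
-- HIGH = set("EALHMQWVFKI")
--
-- def Finding_Nucleation_Sites(window_size, Helix_or_BetaStrand, window_score):
--     if window_size < 0:
--         return []
--     n = len(protein_sequence)
--     # prefix sums of the 0/1 "qualifies" indicator: one pass over the sequence
--     pref = [0]
--     s = 0
--     for ch in protein_sequence:
--         s += 1 if ch in HIGH else 0
--         pref.append(s)
--     sites = []
--     for i in range(n):
--         j = i + window_size
--         if j > n:
--             break
--         if pref[j] - pref[i] >= window_score:
--             sites.append([i, j - 1])
--     return sites
-- ===== Notes on version B (the rewrite author's own statement) =====
-- stated objective: faster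
-- what changed: Replaces the per-window rescan (slice + per-character double dict lookup for every start index) by one precomputed prefix-sum array of a 0/1 qualifies indicator, so each window is scored by one subtraction.
import Mathlib
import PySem

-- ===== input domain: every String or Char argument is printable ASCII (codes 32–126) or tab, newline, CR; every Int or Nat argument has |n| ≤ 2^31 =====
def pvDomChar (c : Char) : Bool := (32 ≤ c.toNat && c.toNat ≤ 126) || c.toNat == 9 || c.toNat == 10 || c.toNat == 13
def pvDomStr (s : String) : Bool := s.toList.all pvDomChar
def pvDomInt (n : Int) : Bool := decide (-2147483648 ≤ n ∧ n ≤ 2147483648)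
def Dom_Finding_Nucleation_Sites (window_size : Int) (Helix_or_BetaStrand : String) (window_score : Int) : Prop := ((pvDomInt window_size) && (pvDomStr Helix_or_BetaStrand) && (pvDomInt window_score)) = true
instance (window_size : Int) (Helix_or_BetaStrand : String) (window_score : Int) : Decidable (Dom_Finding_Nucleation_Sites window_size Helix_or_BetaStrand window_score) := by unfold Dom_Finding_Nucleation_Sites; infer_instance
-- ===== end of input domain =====

-- B replaces A's per-window rescan by a single prefix-sum pass over a 0/1 qualifies
-- indicator (one subtraction per window); proved to return A's exact value on all inputs.


-- ===== PORT A =====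

def pvSeq : String := "MNASSEGESFAGSVQIPGGTTVLVELTPDIHICGICKQQFNNLDAFVAHKQSGCQLTGTSAAAPSTVQFVSEETVPATQTQTTTRTITSETQTITVSAPEFVFEHGYQTYLPTESNENQTATVISLPAKSRTKKPTTPPAQKRLNCCYPGCQFKTAYGMKDMERHLKIHTGDKPHKCEVCGKCFSRKDKLKTHMRCHTGVKPYKCKTCDYAAADSSSLNKHLRIHSDERPFKCQICPYASRNSSQLTVHLRSHTASELDDDVPKANCLSTESTDTPKAPVITLPSEAREQMATLGERTFNCCYPGCHFKTVHGMKDLDRHLRIHTGDKPHKCEFCDKCFSRKDNLTMHMRCHTSVKPHKCHLCDYAAVDSSSLKKHLRIHSDERPYKCQLCPYASRNSSQLTVHLRSHTGDTPFQCWLCSAKFKISSDLKRHMIVHSGEKPFKCEFCDVRCTMKANLKSHIRIKHTFKCLHCAFQGRDRADLLEHSRLHQADHPEKCPECSYSCSSAAALRVHSRVHCKDRPFKCDFCSFDTKRPSSLAKHVDKVHRDEAKTENRAPLGKEGLREGSSQHVAKIVTQRAFRCETCGASFVRDDSLRCHKKQHSDQSENKNSDLVTFPPESGASGQLSTLVS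VGQLEAPLEPSQDL"

def pvCode : PySem.Dict Char String := PySem.Dict.ofList
  [('A', "Ala"), ('R', "Arg"), ('N', "Asn"), ('D', "Asp"),
   ('C', "Cys"), ('E', "Glu"), ('Q', "Gln"), ('G', "Gly"),
   ('H', "His"), ('I', "Ile"), ('L', "Leu"), ('K', "Lys"),
   ('M', "Met"), ('F', "Phe"), ('P', "Pro"), ('S', "Ser"),
   ('T', "Thr"), ('W', "Trp"), ('Y', "Tyr"), ('V', "Val")]

-- the Python table holds exact two-decimal floats used only in the comparison `>= 1`;
-- represented here in exact hundredths (compare `>= 100`), which decides identically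
def pvAlpha : PySem.Dict String Int := PySem.Dict.ofList
  [("Glu", 153), ("Ala", 145), ("Leu", 134), ("His", 124), ("Met", 120),
   ("Gln", 117), ("Trp", 114), ("Val", 114), ("Phe", 112), ("Lys", 107),
   ("Ile", 100), ("Asp", 98), ("Thr", 82), ("Ser", 79), ("Arg", 79),
   ("Cys", 77), ("Asn", 73), ("Tyr", 61), ("Pro", 59), ("Gly", 53)]

-- sum(1 for char in window if code[char] in alpha if alpha[code[char]] >= 1)
def pvCountA (window : List Char) : Int :=
  window.foldl (fun acc c =>
    match PySem.Dict.get? pvCode c with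
    | none => acc        -- Python would raise KeyError; unreachable: every char of pvSeq is a key
    | some t =>
      match PySem.Dict.get? pvAlpha t with
      | none => acc      -- the `in alpha` filter fails
      | some v => if v ≥ 100 then acc + 1 else acc) 0

-- the `for current_index in range(len)` loop with its `break`, as fuel recursion over the range
def pvALoop (window_size window_score : Int) (i : Nat) (fuel : Nat) (acc : List (List Int)) : List (List Int) :=
  match fuel with
  | 0 => acc
  | fuel + 1 =>
    -- window_sequence = protein_sequence[start_index : end_index + 1] (string slicing via toList)
    let window := PySem.List.slice pvSeq.toList (some (i : Int)) (some ((i : Int) + (window_size - 1) + 1))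
    if (window.length : Int) = window_size then
      let acc' := if pvCountA window ≥ window_score then acc ++ [[(i : Int), (i : Int) + (window_size - 1)]] else acc
      pvALoop window_size window_score (i + 1) fuel acc'
    else acc

def Finding_Nucleation_Sites (window_size : Int) (Helix_or_BetaStrand : String) (window_score : Int) : List (List Int) :=
  pvALoop window_size window_score 0 pvSeq.toList.length []

-- ===== PORT B =====

-- HIGH = set("EALHMQWVFKI")
def pvHigh : PySem.Set Char := PySem.Set.ofList "EALHMQWVFKI".toList

-- pref-building loop (append of running sum → cons recursion carrying the running sum s)
def pvMkPref : List Char → Int → List Int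
  | [], _ => []
  | c :: cs, s =>
    let s' := s + (if PySem.Set.contains pvHigh c then 1 else 0)
    s' :: pvMkPref cs s'

-- the scan loop with its `break`; pref[k] read via getD (indices are nonnegative and in range)
def pvBLoop (pref : List Int) (n : Nat) (w ws : Int) (i : Nat) (fuel : Nat) (acc : List (List Int)) : List (List Int) :=
  match fuel with
  | 0 => acc
  | fuel + 1 =>
    let j : Int := (i : Int) + w
    if j > (n : Int) then acc
    else
      let acc' := if pref.getD j.toNat 0 - pref.getD i 0 ≥ ws then acc ++ [[(i : Int), j - 1]] else acc
      pvBLoop pref n w ws (i + 1) fuel acc'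

def Finding_Nucleation_Sites_alt (window_size : Int) (Helix_or_BetaStrand : String) (window_score : Int) : List (List Int) :=
  if window_size < 0 then []
  else
    let cs := pvSeq.toList
    let pref := 0 :: pvMkPref cs 0
    pvBLoop pref cs.length window_size window_score 0 cs.length []

-- ===== PRECONDITION & SPEC =====
def Spec_Finding_Nucleation_Sites (window_size : Int) (Helix_or_BetaStrand : String) (window_score : Int) (out : List (List Int)) : Prop := out = Finding_Nucleation_Sites_alt window_size Helix_or_BetaStrand window_score
instance (window_size : Int) (Helix_or_BetaStrand : String) (window_score : Int) (out : List (List Int)) : Decidable (Spec_Finding_Nucleation_Sites window_size Helix_or_BetaStrand window_score out) := by unfold Spec_Finding_Nucleation_Sites; infer_instance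

-- ===== CLAIM (what is proved, stated in full; the proofs are below) =====
def Claim_equal_Finding_Nucleation_Sites : Prop := ∀ (window_size : Int) (Helix_or_BetaStrand : String) (window_score : Int), Dom_Finding_Nucleation_Sites window_size Helix_or_BetaStrand window_score → Spec_Finding_Nucleation_Sites window_size Helix_or_BetaStrand window_score (Finding_Nucleation_Sites window_size Helix_or_BetaStrand window_score)

-- ===== LEMMAS AND PROOFS =====

-- A's per-character test as a Bool predicate
def pvPredA (c : Char) : Bool :=
  match PySem.Dict.get? pvCode c with
  | none => false
  | some t =>
    match PySem.Dict.get? pvAlpha t with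
    | none => false
    | some v => v ≥ 100

theorem pvPredA_eq (c : Char) : pvPredA c = PySem.Set.contains pvHigh c := by
  by_cases h1 : c = 'A'; · subst h1; decide
  by_cases h2 : c = 'R'; · subst h2; decide
  by_cases h3 : c = 'N'; · subst h3; decide
  by_cases h4 : c = 'D'; · subst h4; decide
  by_cases h5 : c = 'C'; · subst h5; decide
  by_cases h6 : c = 'E'; · subst h6; decide
  by_cases h7 : c = 'Q'; · subst h7; decide
  by_cases h8 : c = 'G'; · subst h8; decide
  by_cases h9 : c = 'H'; · subst h9; decide
  by_cases h10 : c = 'I'; · subst h10; decide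
  by_cases h11 : c = 'L'; · subst h11; decide
  by_cases h12 : c = 'K'; · subst h12; decide
  by_cases h13 : c = 'M'; · subst h13; decide
  by_cases h14 : c = 'F'; · subst h14; decide
  by_cases h15 : c = 'P'; · subst h15; decide
  by_cases h16 : c = 'S'; · subst h16; decide
  by_cases h17 : c = 'T'; · subst h17; decide
  by_cases h18 : c = 'W'; · subst h18; decide
  by_cases h19 : c = 'Y'; · subst h19; decide
  by_cases h20 : c = 'V'; · subst h20; decide
  have hc : pvCode = PySem.Dict.mk
      [('A', "Ala"), ('R', "Arg"), ('N', "Asn"), ('D', "Asp"), ('C', "Cys"), ('E', "Glu"), ('Q', "Gln"),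
       ('G', "Gly"), ('H', "His"), ('I', "Ile"), ('L', "Leu"), ('K', "Lys"), ('M', "Met"), ('F', "Phe"),
       ('P', "Pro"), ('S', "Ser"), ('T', "Thr"), ('W', "Trp"), ('Y', "Tyr"), ('V', "Val")] := by decide
  simp [pvPredA, hc, pvHigh, PySem.Dict.get?_mk_cons, PySem.Dict.get?, PySem.Set.ofList, PySem.Set.contains,
        h1,h2,h3,h4,h5,h6,h7,h8,h9,h10,h11,h12,h13,h14,h15,h16,h17,h18,h19,h20,
        Ne.symm h1,Ne.symm h2,Ne.symm h3,Ne.symm h4,Ne.symm h5,Ne.symm h6,Ne.symm h7,Ne.symm h8,Ne.symm h9,Ne.symm h10,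
        Ne.symm h11,Ne.symm h12,Ne.symm h13,Ne.symm h14,Ne.symm h15,Ne.symm h16,Ne.symm h17,Ne.symm h18,Ne.symm h19,Ne.symm h20]


theorem pvCountA_eq (l : List Char) :
    pvCountA l = ((l.countP (fun c => PySem.Set.contains pvHigh c)) : Int) := by
  unfold pvCountA
  have hstep : (fun (acc : Int) (c : Char) =>
      match PySem.Dict.get? pvCode c with
      | none => acc
      | some t =>
        match PySem.Dict.get? pvAlpha t with
        | none => acc
        | some v => if v ≥ 100 then acc + 1 else acc)
      = fun (acc : Int) (c : Char) => if pvPredA c then acc + 1 else acc := by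
    funext acc c
    unfold pvPredA
    cases hA : PySem.Dict.get? pvCode c with
    | none => simp [hA]
    | some t =>
      cases hB : PySem.Dict.get? pvAlpha t with
      | none => simp [hA, hB]
      | some v => simp [hA, hB]
  rw [hstep, PySem.List.foldl_if_add_one]
  have hcp : l.countP pvPredA = l.countP (fun c => PySem.Set.contains pvHigh c) :=
    List.countP_congr (fun x _ => by rw [pvPredA_eq x])
  rw [hcp]; omega


theorem pvMkPref_getD (l : List Char) (s : Int) (k : Nat) (hk : k ≤ l.length) :
    (s :: pvMkPref l s).getD k 0
      = s + (((l.take k).countP (fun c => PySem.Set.contains pvHigh c)) : Int) := by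
  induction l generalizing s k with
  | nil => simp only [List.length_nil, Nat.le_zero] at hk; subst hk; simp
  | cons c t ih =>
    cases k with
    | zero => simp
    | succ k' =>
      have := ih (s + (if PySem.Set.contains pvHigh c then 1 else 0)) k' (by simpa using hk)
      simp only [pvMkPref, List.getD_cons_succ] at *
      rw [this, List.take_succ_cons, List.countP_cons]
      split_ifs <;> simp_all <;> omega


theorem pvALoop_neg (w ws : Int) (hw : w < 0) :
    forall (fuel i : Nat) (acc : List (List Int)), pvALoop w ws i fuel acc = acc := by
  intro fuel i acc
  cases fuel with
  | zero => rfl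
  | succ fuel =>
    simp only [pvALoop]
    rw [if_neg]
    intro h
    have := Int.natCast_nonneg (PySem.List.slice pvSeq.toList (some (i : Int)) (some ((i : Int) + (w - 1) + 1))).length
    omega


theorem pvLoop_eq (w ws : Int) (wn : Nat) (hw : w = (wn : Int)) :
    forall (fuel i : Nat) (acc : List (List Int)), i + fuel = pvSeq.toList.length ->
      pvALoop w ws i fuel acc
        = pvBLoop (0 :: pvMkPref pvSeq.toList 0) pvSeq.toList.length w ws i fuel acc := by
  intro fuel
  induction fuel with
  | zero => intro i acc _; rfl
  | succ fuel ih =>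
    intro i acc hi
    simp only [pvALoop, pvBLoop]
    have hb : (i : Int) + (w - 1) + 1 = (i : Int) + (wn : Int) := by rw [hw]; ring
    rw [hb, PySem.List.slice_natCast_add]
    have hlen : ((pvSeq.toList.drop i).take wn).length = min wn (pvSeq.toList.length - i) := by
      simp [List.length_take, List.length_drop]
    by_cases hin : (i : Int) + w <= (pvSeq.toList.length : Int)
    · have hApos : (((pvSeq.toList.drop i).take wn).length : Int) = w := by
        rw [hlen, hw, hw] at *
        have : min wn (pvSeq.toList.length - i) = wn := by omega
        rw [this]
      have hBpos : ¬((i : Int) + w > (pvSeq.toList.length : Int)) := by omega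
      rw [if_pos hApos, if_neg hBpos]
      have hjt : ((i : Int) + w).toNat = i + wn := by rw [hw]; omega
      have hA := pvCountA_eq ((pvSeq.toList.drop i).take wn)
      have h1 := pvMkPref_getD pvSeq.toList 0 (i + wn) (by rw [hw] at hin; omega)
      have h2 := pvMkPref_getD pvSeq.toList 0 i (by omega)
      have hsplit : pvSeq.toList.take (i + wn) = pvSeq.toList.take i ++ (pvSeq.toList.drop i).take wn := by
        rw [List.take_add]
      have hcnt : ((0 :: pvMkPref pvSeq.toList 0).getD ((i : Int) + w).toNat 0
             - (0 :: pvMkPref pvSeq.toList 0).getD i 0)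
          = pvCountA ((pvSeq.toList.drop i).take wn) := by
        rw [hjt, h1, h2, hA, hsplit, List.countP_append]
        push_cast; ring
      rw [hcnt]
      have hel : (i : Int) + w - 1 = (i : Int) + (w - 1) := by ring
      rw [hel]
      exact ih (i + 1) _ (by omega)
    · have hAneg : ¬((((pvSeq.toList.drop i).take wn).length : Int) = w) := by
        rw [hlen, hw] at *
        intro h
        have h' : min wn (pvSeq.toList.length - i) = wn := by exact_mod_cast h
        omega
      have hBneg : (i : Int) + w > (pvSeq.toList.length : Int) := by omega
      rw [if_neg hAneg, if_pos hBneg]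


-- ===== VERDICT (by name: the statement is the Claim_ definition above) =====
theorem Finding_Nucleation_Sites_spec : Claim_equal_Finding_Nucleation_Sites := by
  intro w H ws _
  unfold Spec_Finding_Nucleation_Sites Finding_Nucleation_Sites Finding_Nucleation_Sites_alt
  by_cases hw : w < 0
  · simp [hw, pvALoop_neg w ws hw]
  · simp only [hw, if_false]
    exact pvLoop_eq w ws w.toNat (Int.toNat_of_nonneg (by omega)).symm _ 0 [] (by omega)
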